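-- pv_equiv track=rewrite | github.com/Sachithx/Time-Series-Library | layers/Patcher.py | split_large_numbers
-- ===== SOURCE A (Python) =====
-- def split_large_numbers(lst, m):
--     """Split numbers larger than m into multiple chunks of size m"""
--     new_lst = []
--     for i in lst:
--         if i > m:
--             while i > m:
--                 new_lst.append(m)
--                 i -= m
--             new_lst.append(i)
--         else:
--             new_lst.append(i)
--
--     assert sum(new_lst) == sum(lst), f"Sum mismatch: {sum(new_lst)} != {sum(lst)}"
--     return new_lst
-- ===== SOURCE B (Python) =====
-- def split_large_numbers(lst, m):
--     """Split numbers larger than m into multiple chunks of size m"""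
--     new_lst = []
--     for i in lst:
--         if i > m:
--             q, r = divmod(i, m)
--             new_lst.extend([m] * q)
--             if r:
--                 new_lst.append(r)
--         else:
--             new_lst.append(i)
--     assert sum(new_lst) == sum(lst), f"Sum mismatch: {sum(new_lst)} != {sum(lst)}"
--     return new_lst
-- ===== Notes on version B (the rewrite author's own statement) =====
-- stated objective: alternative
-- what changed: The per-element while-loop that subtracts m one step at a time is replaced by a single divmod: extend with q copies of m and append the nonzero remainder, computing the chunk count in closed form instead of by repeated subtraction.
import Mathlib
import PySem

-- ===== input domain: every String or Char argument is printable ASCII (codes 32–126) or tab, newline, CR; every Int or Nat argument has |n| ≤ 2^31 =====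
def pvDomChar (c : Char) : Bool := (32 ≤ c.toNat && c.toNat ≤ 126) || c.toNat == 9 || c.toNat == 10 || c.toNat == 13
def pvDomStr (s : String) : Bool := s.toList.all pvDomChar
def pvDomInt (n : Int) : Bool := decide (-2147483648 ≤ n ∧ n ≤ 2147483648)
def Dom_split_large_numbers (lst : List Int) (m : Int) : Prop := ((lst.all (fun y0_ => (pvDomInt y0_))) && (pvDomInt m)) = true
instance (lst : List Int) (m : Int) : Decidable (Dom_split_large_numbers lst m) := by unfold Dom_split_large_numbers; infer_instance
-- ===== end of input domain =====

-- B replaces A's per-element while-loop (subtract m one step at a time) by one divmod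
-- computing the chunk count in closed form; return values agree on all of Pre_.

-- ===== PORT A =====
-- A's inner `while i > m: append m; i -= m` followed by `append i`; the `m > 0` side
-- condition is only a termination guard (Python diverges when it fails; Pre_ excludes that).
def splitWhileA (m i : Int) : List Int :=
  if h : m < i ∧ 0 < m then m :: splitWhileA m (i - m) else [i]
termination_by (i - m).toNat
decreasing_by omega

-- the final `assert sum(new_lst) == sum(lst)` always succeeds (the chunks of each element
-- sum to the element), so it does not restrict the returned value
def split_large_numbers (lst : List Int) (m : Int) : List Int :=
  lst.foldl (fun new_lst i =>
    if i > m then new_lst ++ splitWhileA m i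
    else new_lst ++ [i]) []

-- ===== PORT B =====
-- q, r = divmod(i, m); extend [m]*q; if r: append r   (q ≥ 0 whenever this branch runs inside Pre_)
def split_large_numbers_alt (lst : List Int) (m : Int) : List Int :=
  lst.foldl (fun new_lst i =>
    if i > m then
      let q := PySem.Int.floordiv i m
      let r := PySem.Int.mod i m
      (new_lst ++ List.replicate q.toNat m) ++ (if r ≠ 0 then [r] else [])
    else new_lst ++ [i]) []

-- ===== PRECONDITION & SPEC =====
-- Pre_ excludes exactly the inputs on which Python A never returns: with m ≤ 0 and some
-- element i > m, the `while i > m: i -= m` loop does not terminate (and B's divmod raises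
-- ZeroDivisionError for m = 0).
def Pre_split_large_numbers (lst : List Int) (m : Int) : Prop :=
  0 < m ∨ ∀ i ∈ lst, i ≤ m
instance (lst : List Int) (m : Int) : Decidable (Pre_split_large_numbers lst m) := by
  unfold Pre_split_large_numbers; infer_instance

def pvWitness_split_large_numbers : List Int × Int := ([7, -2, 3, 10], 3)

def Spec_split_large_numbers (lst : List Int) (m : Int) (out : List Int) : Prop := out = split_large_numbers_alt lst m
instance (lst : List Int) (m : Int) (out : List Int) : Decidable (Spec_split_large_numbers lst m out) := by unfold Spec_split_large_numbers; infer_instance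

-- ===== CLAIM (what is proved, stated in full; the proofs are below) =====
def Claim_equal_split_large_numbers : Prop := ∀ (lst : List Int) (m : Int), Dom_split_large_numbers lst m → Pre_split_large_numbers lst m → Spec_split_large_numbers lst m (split_large_numbers lst m)

-- ===== LEMMAS AND PROOFS =====

-- B's chunk list for one element
def chunksB (m i : Int) : List Int :=
  List.replicate (PySem.Int.floordiv i m).toNat m ++ (if PySem.Int.mod i m ≠ 0 then [PySem.Int.mod i m] else [])

theorem chunksB_base {m i : Int} (hm : 0 < m) (h0 : 0 < i) (hle : i ≤ m) :
    chunksB m i = [i] := by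
  rcases eq_or_lt_of_le hle with h | h
  · subst h
    have hq : PySem.Int.floordiv i i = 1 := by
      rw [PySem.Int.floordiv_eq_iff_of_pos hm]; constructor <;> nlinarith
    have hr : PySem.Int.mod i i = 0 := by
      rw [PySem.Int.mod_eq_zero_iff_dvd]
    simp [chunksB, hq, hr]
  · have hq : PySem.Int.floordiv i m = 0 := by
      rw [PySem.Int.floordiv_eq_iff_of_pos hm]; constructor <;> nlinarith
    have hr : PySem.Int.mod i m = i := by
      have h1 := PySem.Int.floordiv_mul_add_mod i m
      rw [hq] at h1; simpa using h1
    simp [chunksB, hq, hr]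
    omega

theorem chunksB_step {m i : Int} (hm : 0 < m) (hgt : m < i) :
    chunksB m i = m :: chunksB m (i - m) := by
  have hq' : 0 ≤ PySem.Int.floordiv (i - m) m := by
    rw [PySem.Int.le_floordiv_iff_mul_le hm]; omega
  have hq : PySem.Int.floordiv i m = PySem.Int.floordiv (i - m) m + 1 := by
    rw [PySem.Int.floordiv_eq_iff_of_pos hm]
    have h1 := (PySem.Int.floordiv_eq_iff_of_pos hm (a := i - m)
      (q := PySem.Int.floordiv (i - m) m)).mp rfl
    constructor <;> nlinarith [h1.1, h1.2]
  have hr : PySem.Int.mod i m = PySem.Int.mod (i - m) m := by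
    have h1 := PySem.Int.floordiv_mul_add_mod i m
    have h2 := PySem.Int.floordiv_mul_add_mod (i - m) m
    nlinarith
  have hnat : (PySem.Int.floordiv i m).toNat = (PySem.Int.floordiv (i - m) m).toNat + 1 := by
    omega
  have hsucc : (PySem.Int.floordiv (i - m) m + 1).toNat =
      (PySem.Int.floordiv (i - m) m).toNat + 1 := by omega
  simp [chunksB, hq, hr, hsucc, List.replicate_succ]

theorem splitWhileA_eq_chunksB {m : Int} (hm : 0 < m) (i : Int) (hi : 0 < i) :
    splitWhileA m i = chunksB m i := by
  induction hn : i.toNat using Nat.strong_induction_on generalizing i with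
  | _ n ih =>
    by_cases h : m < i
    · rw [splitWhileA, dif_pos ⟨h, hm⟩, chunksB_step hm h,
        ih (i - m).toNat (by omega) (i - m) (by omega) rfl]
    · rw [splitWhileA, dif_neg (by omega), chunksB_base hm hi (by omega)]

theorem foldl_congr_elems (lst : List Int) (m : Int)
    (h : ∀ i ∈ lst, (if i > m then splitWhileA m i else [i]) =
         (if i > m then chunksB m i else [i])) :
    split_large_numbers lst m = split_large_numbers_alt lst m := by
  unfold split_large_numbers split_large_numbers_alt
  suffices H : ∀ acc : List Int,
      lst.foldl (fun new_lst i => if i > m then new_lst ++ splitWhileA m i else new_lst ++ [i]) acc =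
      lst.foldl (fun new_lst i =>
        if i > m then
          (new_lst ++ List.replicate (PySem.Int.floordiv i m).toNat m) ++
            (if PySem.Int.mod i m ≠ 0 then [PySem.Int.mod i m] else [])
          else new_lst ++ [i]) acc from H []
  induction lst with
  | nil => intro acc; rfl
  | cons x xs ih =>
    intro acc
    have hx := h x (by simp)
    have hxs : ∀ i ∈ xs, (if i > m then splitWhileA m i else [i]) =
         (if i > m then chunksB m i else [i]) := fun i hi => h i (by simp [hi])
    simp only [List.foldl_cons]
    rw [ih hxs]
    congr 1
    by_cases hgt : x > m
    · simp only [if_pos hgt] at hx ⊢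
      rw [hx]; simp [chunksB, List.append_assoc]
    · simp [hgt]

-- ===== VERDICT (by name: the statement is the Claim_ definition above) =====
theorem split_large_numbers_spec : Claim_equal_split_large_numbers := by
  intro lst m _ hpre
  unfold Spec_split_large_numbers
  refine (foldl_congr_elems lst m ?_).symm ▸ rfl
  intro i hi
  by_cases hgt : i > m
  · rcases hpre with hm | hall
    · simp only [if_pos hgt]
      exact splitWhileA_eq_chunksB hm i (by omega)
    · exact absurd (hall i hi) (by omega)
  · simp [hgt]
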